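-- pv_equiv track=rewrite | github.com/Snopoff/Bioinformatics-Algorithms | Stepik course/section1.py | calcSkew
-- ===== SOURCE A (Python) =====
-- def changeSuffix(arr: list, pos: int, value: int):
--     for i in range(pos, len(arr)):
--         arr[i] = value
--     return arr
--
-- def calcSkew(genome: str):
--     """
--     If this nucleotide is G, then
--         Skewi+1(Genome) = Skewi(Genome) + 1;
--     If this nucleotide is C, then
--         Skewi+1(Genome)= Skewi(Genome) – 1;
--     Otherwise,
--         Skewi+1(Genome) = Skewi(Genome).
--     """
--     n = len(genome)
--     skew = [0]*(n+1)
--     for i in range(0, n):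
--         if genome[i] == "G":
--             changeSuffix(skew, i+1, skew[i]+1)
--         elif genome[i] == "C":
--             changeSuffix(skew, i+1, skew[i]-1)
--     return skew
-- ===== SOURCE B (Python) =====
-- def calcSkew(genome: str):
--     s = 0
--     out = [0]
--     for c in genome:
--         s += 1 if c == "G" else (-1 if c == "C" else 0)
--         out.append(s)
--     return out
-- ===== Notes on version B (the rewrite author's own statement) =====
-- stated objective: simpler
-- what changed: Replaces the loop that rewrites the whole suffix of a preallocated skew array at every G/C with a single pass that appends a running cumulative sum once per character.
import Mathlib
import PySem

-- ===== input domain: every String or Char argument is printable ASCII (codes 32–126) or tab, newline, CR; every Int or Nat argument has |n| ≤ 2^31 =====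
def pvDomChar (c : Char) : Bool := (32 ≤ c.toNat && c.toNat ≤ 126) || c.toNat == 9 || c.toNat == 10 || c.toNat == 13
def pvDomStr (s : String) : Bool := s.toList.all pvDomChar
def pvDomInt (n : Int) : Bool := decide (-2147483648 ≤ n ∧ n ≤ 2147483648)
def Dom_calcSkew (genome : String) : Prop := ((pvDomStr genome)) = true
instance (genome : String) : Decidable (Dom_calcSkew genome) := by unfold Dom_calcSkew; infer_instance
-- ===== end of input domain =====

-- B replaces A's suffix-rewriting loop over a preallocated array with a single-pass running cumulative sum (simpler).


-- ===== PORT A =====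
-- for i in range(pos, len(arr)): arr[i] = value  — indices are nonnegative and in range, so List.set is exact here
def changeSuffixA (arr : List Int) (pos : Nat) (value : Int) : List Int :=
  (List.range' pos (arr.length - pos)).foldl (fun a i => a.set i value) arr

-- loop body of A; genome[i] and skew[i] read with in-range nonnegative indices, so getD is exact here
def skewStepA (g : List Char) (skew : List Int) (i : Nat) : List Int :=
  if g.getD i ' ' = 'G' then changeSuffixA skew (i + 1) (skew.getD i 0 + 1)
  else if g.getD i ' ' = 'C' then changeSuffixA skew (i + 1) (skew.getD i 0 - 1)
  else skew

def calcSkew (genome : String) : List Int :=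
  let g := genome.toList
  (List.range g.length).foldl (skewStepA g) (List.replicate (g.length + 1) 0)

-- ===== PORT B =====
def calcSkew_alt (genome : String) : List Int :=
  (genome.toList.foldl
    (fun p c =>
      let s' := p.1 + (if c = 'G' then (1 : Int) else if c = 'C' then -1 else 0)
      (s', p.2 ++ [s']))
    ((0 : Int), ([0] : List Int))).2

-- ===== PRECONDITION & SPEC =====
def Spec_calcSkew (genome : String) (out : List Int) : Prop := out = calcSkew_alt genome
instance (genome : String) (out : List Int) : Decidable (Spec_calcSkew genome out) := by unfold Spec_calcSkew; infer_instance

-- ===== CLAIM (what is proved, stated in full; the proofs are below) =====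
def Claim_equal_calcSkew : Prop := ∀ (genome : String), Dom_calcSkew genome → Spec_calcSkew genome (calcSkew genome)

-- ===== LEMMAS AND PROOFS =====

-- the list of pref skews after the initial 0
def skewList (s : Int) : List Char → List Int
  | [] => []
  | c :: t =>
      let s' := s + (if c = 'G' then (1 : Int) else if c = 'C' then -1 else 0)
      s' :: skewList s' t

lemma setRange (cnt : Nat) : ∀ (pos : Nat) (arr : List Int) (v : Int), pos + cnt ≤ arr.length →
    (List.range' pos cnt).foldl (fun a i => a.set i v) arr
      = arr.take pos ++ List.replicate cnt v ++ arr.drop (pos + cnt) := by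
  induction cnt with
  | zero => intro pos arr v h; simp
  | succ n ih =>
      intro pos arr v h
      have hpos : pos < arr.length := by omega
      have : List.range' pos (n + 1) = pos :: List.range' (pos + 1) n := by
        simp [List.range'_succ]
      rw [this]
      simp only [List.foldl_cons]
      rw [ih (pos + 1) (arr.set pos v) v (by simp; omega)]
      have hA : (arr.take pos).length = pos := by simp; omega
      rw [List.set_eq_take_append_cons_drop, if_pos hpos]
      rw [List.take_append, List.drop_append, hA]
      have e1 : (arr.take pos).take (pos + 1) = arr.take pos :=
        List.take_of_length_le (by omega)
      have e2 : pos + 1 - pos = 1 := by omega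
      have e3 : pos + 1 + n - pos = n + 1 := by omega
      have e4 : (arr.take pos).drop (pos + 1 + n) = [] :=
        List.drop_eq_nil_of_le (by omega)
      rw [e1, e2, e3, e4]
      have e6 : n + (pos + 1) = pos + (n + 1) := by omega
      simp [List.replicate_succ, List.drop_drop]
      omega

lemma changeSuffixA_eq (arr : List Int) (pos : Nat) (v : Int) (h : pos ≤ arr.length) :
    changeSuffixA arr pos v = arr.take pos ++ List.replicate (arr.length - pos) v := by
  unfold changeSuffixA
  rw [setRange (arr.length - pos) pos arr v (by omega)]
  have : pos + (arr.length - pos) = arr.length := by omega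
  rw [this]
  simp

lemma mainA (tail : List Char) : ∀ (pre : List Char) (pref : List Int) (s : Int),
    pref.length = pre.length →
    (List.range' pre.length tail.length).foldl (skewStepA (pre ++ tail))
        (pref ++ List.replicate (tail.length + 1) s)
      = pref ++ s :: skewList s tail := by
  induction tail with
  | nil => intro pre pref s h; simp [skewList]
  | cons c t ih =>
      intro pre pref s h
      have hrange : List.range' pre.length (t.length + 1)
          = pre.length :: List.range' (pre.length + 1) t.length := by
        simp [List.range'_succ]
      rw [List.length_cons, hrange]
      simp only [List.foldl_cons]
      have hlen : (pref ++ List.replicate (t.length + 1 + 1) s).length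
          = pref.length + t.length + 2 := by simp; omega
      have hgetg : (pre ++ c :: t).getD pre.length ' ' = c := by
        simp
      have hgets : (pref ++ List.replicate (t.length + 1 + 1) s).getD pre.length 0 = s := by
        rw [← h]
        simp [List.replicate_succ]
      have htake : (pref ++ List.replicate (t.length + 1 + 1) s).take (pre.length + 1)
          = pref ++ [s] := by
        rw [← h, List.take_append]
        simp [List.replicate_succ]
      have hcs : ∀ v : Int,
          changeSuffixA (pref ++ List.replicate (t.length + 1 + 1) s) (pre.length + 1) v
            = (pref ++ [s]) ++ List.replicate (t.length + 1) v := by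
        intro v
        rw [changeSuffixA_eq _ _ _ (by rw [hlen, ← h]; omega), htake, hlen, ← h]
        have : pref.length + t.length + 2 - (pref.length + 1) = t.length + 1 := by omega
        rw [this]
      have hIH := ih (pre ++ [c]) (pref ++ [s])
      simp only [List.length_append, List.length_cons, List.length_nil] at hIH
      have hIH' : ∀ s' : Int,
          (List.range' (pre.length + 1) t.length).foldl (skewStepA (pre ++ c :: t))
              ((pref ++ [s]) ++ List.replicate (t.length + 1) s')
            = (pref ++ [s]) ++ s' :: skewList s' t := by
        intro s'
        have := hIH s' (by simp [h])
        simpa using this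
      have hstep : skewStepA (pre ++ c :: t) (pref ++ List.replicate (t.length + 1 + 1) s) pre.length
          = (pref ++ [s]) ++ List.replicate (t.length + 1)
              (s + (if c = 'G' then (1 : Int) else if c = 'C' then -1 else 0)) := by
        unfold skewStepA
        rw [hgetg, hgets]
        by_cases hG : c = 'G'
        · simp [hG, hcs]
        · by_cases hC : c = 'C'
          · simp [hC, hcs]
            ring
          · simp only [hG, hC, if_false]
            simp [List.replicate_succ, List.append_assoc]
      rw [hstep, hIH']
      simp [skewList, List.append_assoc]
lemma calcSkewA_eq (genome : String) :
    calcSkew genome = 0 :: skewList 0 genome.toList := by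
  unfold calcSkew
  have := mainA genome.toList [] [] 0 rfl
  simpa [List.range_eq_range'] using this

lemma foldB (l : List Char) : ∀ (s : Int) (acc : List Int),
    (l.foldl (fun p c =>
        let s' := p.1 + (if c = 'G' then (1 : Int) else if c = 'C' then -1 else 0)
        (s', p.2 ++ [s'])) (s, acc)).2 = acc ++ skewList s l := by
  induction l with
  | nil => intro s acc; simp [skewList]
  | cons c t ih =>
      intro s acc
      simp only [List.foldl_cons]
      rw [ih]
      simp [skewList]

lemma calcSkewB_eq (genome : String) :
    calcSkew_alt genome = 0 :: skewList 0 genome.toList := by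
  unfold calcSkew_alt
  rw [foldB]
  simp

-- ===== VERDICT (by name: the statement is the Claim_ definition above) =====
theorem calcSkew_spec : Claim_equal_calcSkew := by
  intro genome _
  unfold Spec_calcSkew
  rw [calcSkewA_eq, calcSkewB_eq]
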